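-- pv_equiv track=rewrite | github.com/limdongjin/ProblemSolving | Boj/16953.py | solve
-- ===== SOURCE A (Python) =====
-- def solve(a, b):
--     assert a != b
--
--     ret = 0
--     while a < b:
--         if b % 2 == 0:
--             b //= 2
--             ret += 1
--             continue
--         elif b % 10 == 1:
--             b //= 10
--             ret += 1
--             continue
--         else:
--             ret = -1
--             break
--
--     if a == b:
--         return ret + 1
--     else:
--         return -1
-- ===== SOURCE B (Python) =====
-- def solve(a, b):
--     assert a != b
--
--     def go(v):
--         # fewest *2 / *10+1 operations turning v into b, or None if impossible
--         if v == b: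
--             return 0
--         best = None
--         for w in (v * 2, v * 10 + 1):
--             if v < w <= b:
--                 r = go(w)
--                 if r is not None and (best is None or r + 1 < best):
--                     best = r + 1
--         return best
--
--     r = go(a)
--     return r + 1 if r is not None else -1
-- ===== Notes on version B (the rewrite author's own statement) =====
-- stated objective: alternative
-- what changed: B replaces A's backward greedy reduction of b (halve / strip trailing 1) by a recursive forward search from a over the *2 / *10+1 tree pruned at b, taking the fewest operations found.
-- outside the precondition, e.g. on solve(-1, 3): A returns -1, B returns -1
import Mathlib
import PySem

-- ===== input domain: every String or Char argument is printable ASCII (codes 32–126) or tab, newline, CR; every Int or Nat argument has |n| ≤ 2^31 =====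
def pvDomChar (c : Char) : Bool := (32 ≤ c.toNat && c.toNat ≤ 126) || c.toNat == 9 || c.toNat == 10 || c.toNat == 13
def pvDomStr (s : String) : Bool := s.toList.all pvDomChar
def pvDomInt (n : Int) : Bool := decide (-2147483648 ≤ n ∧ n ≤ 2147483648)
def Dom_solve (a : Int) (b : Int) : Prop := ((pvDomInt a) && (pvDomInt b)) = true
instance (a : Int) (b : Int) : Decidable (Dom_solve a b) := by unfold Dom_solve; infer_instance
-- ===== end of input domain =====

-- B searches forward from a instead of reducing b backwards; equal return values on Pre_.

-- ===== PORT A =====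
-- A's while-loop; the Nat argument is a totality fuel only (b.natAbs + 1 steps always
-- suffice on Pre_ inputs, where each iteration strictly shrinks |b|).
def solveLoopA : Nat → Int → Int → Int → Int × Int
  | 0, _, b, ret => (b, ret)
  | f + 1, a, b, ret =>
    if a < b then
      if PySem.Int.mod b 2 = 0 then solveLoopA f a (PySem.Int.floordiv b 2) (ret + 1)
      else if PySem.Int.mod b 10 = 1 then solveLoopA f a (PySem.Int.floordiv b 10) (ret + 1)
      else (b, -1)
    else (b, ret)

def solve (a : Int) (b : Int) : Int :=
  let r := solveLoopA (b.natAbs + 1) a b 0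
  if a = r.1 then r.2 + 1 else -1

-- ===== PORT B =====
-- the body of Source B's 'if r is not None and (best is None or r + 1 < best): best = r + 1'
def solveUpd (best : Option Int) (r : Option Int) : Option Int :=
  match r with
  | none => best
  | some rv =>
    match best with
    | none => some (rv + 1)
    | some bv => if rv + 1 < bv then some (rv + 1) else some bv

-- Source B's recursive 'go': fewest *2 / *10+1 operations turning v into b, none if impossible
def solveGo (b : Int) (v : Int) : Option Int :=
  if v = b then some 0
  else
    let best : Option Int := none
    let best := if _h1 : v < v * 2 ∧ v * 2 ≤ b then solveUpd best (solveGo b (v * 2)) else best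
    let best := if _h2 : v < v * 10 + 1 ∧ v * 10 + 1 ≤ b then solveUpd best (solveGo b (v * 10 + 1)) else best
    best
termination_by (b - v).toNat
decreasing_by all_goals omega

def solve_alt (a : Int) (b : Int) : Int :=
  match solveGo b a with
  | some r => r + 1
  | none => -1

-- ===== PRECONDITION & SPEC =====
-- Pre_ excludes a == b, where A's assert raises, and a < 0 ≤ b, a region containing
-- infinitely many inputs on which A loops forever (whenever b's halve/strip-1 chain
-- reaches 0, e.g. a = -1, b = 2); the clean boundary also drops some inputs of that
-- region where both programs return -1 (e.g. a = -1, b = 3).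
def Pre_solve (a : Int) (b : Int) : Prop := a ≠ b ∧ (0 ≤ a ∨ b < 0)
instance (a : Int) (b : Int) : Decidable (Pre_solve a b) := by unfold Pre_solve; infer_instance

def pvWitness_solve : Int × Int := (2, 162)

def Spec_solve (a : Int) (b : Int) (out : Int) : Prop := out = solve_alt a b
instance (a : Int) (b : Int) (out : Int) : Decidable (Spec_solve a b out) := by unfold Spec_solve; infer_instance

-- ===== CLAIM (what is proved, stated in full; the proofs are below) =====
def Claim_equal_solve : Prop := ∀ (a : Int) (b : Int), Dom_solve a b → Pre_solve a b → Spec_solve a b (solve a b)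

-- ===== LEMMAS AND PROOFS =====

theorem solveGo_unfold (b v : Int) : solveGo b v =
    (if v = b then some 0
     else
       if v < v * 10 + 1 ∧ v * 10 + 1 ≤ b then
         solveUpd (if v < v * 2 ∧ v * 2 ≤ b then solveUpd none (solveGo b (v * 2)) else none)
           (solveGo b (v * 10 + 1))
       else
         (if v < v * 2 ∧ v * 2 ≤ b then solveUpd none (solveGo b (v * 2)) else none)) := by
  rw [solveGo]
  split_ifs <;> rfl

theorem solveUpd_none (best : Option Int) : solveUpd best none = best := rfl

theorem solveUpd_map (bR rR : Option Int) :
    solveUpd (bR.map (· + 1)) (rR.map (· + 1)) = (solveUpd bR rR).map (· + 1) := by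
  cases rR with
  | none => rfl
  | some r =>
    cases bR with
    | none => rfl
    | some q =>
      simp only [Option.map, solveUpd]
      split_ifs <;> simp_all

-- no path ever reaches b from a v with 2v > b or v < 0 (both children are pruned)
theorem solveGo_none_big (b v : Int) (hne : v ≠ b) (h : b < 2 * v ∨ v < 0) :
    solveGo b v = none := by
  have h1 : ¬ (v < v * 2 ∧ v * 2 ≤ b) := by omega
  have h2 : ¬ (v < v * 10 + 1 ∧ v * 10 + 1 ≤ b) := by omega
  rw [solveGo_unfold, if_neg hne, if_neg h2, if_neg h1]

theorem solveGo_self (b : Int) : solveGo b b = some 0 := by rw [solveGo_unfold]; simp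

-- if b has no parent (odd, not ending in digit 1), nothing reaches it
theorem solveGo_no_parent (b w : Int) (hb2 : b % 2 = 1) (hb10 : b % 10 ≠ 1)
    (hne : w ≠ b) : solveGo b w = none := by
  rw [solveGo_unfold, if_neg hne]
  by_cases h1 : w < w * 2 ∧ w * 2 ≤ b
  · have e1 : solveGo b (w * 2) = none :=
      solveGo_no_parent b (w * 2) hb2 hb10 (by omega)
    by_cases h2 : w < w * 10 + 1 ∧ w * 10 + 1 ≤ b
    · have e2 : solveGo b (w * 10 + 1) = none :=
        solveGo_no_parent b (w * 10 + 1) hb2 hb10 (by omega)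
      rw [if_pos h2, if_pos h1, e1, e2]; rfl
    · rw [if_neg h2, if_pos h1, e1]; rfl
  · by_cases h2 : w < w * 10 + 1 ∧ w * 10 + 1 ≤ b
    · have e2 : solveGo b (w * 10 + 1) = none :=
        solveGo_no_parent b (w * 10 + 1) hb2 hb10 (by omega)
      rw [if_pos h2, if_neg h1, e2]; rfl
    · rw [if_neg h2, if_neg h1]
termination_by (b - w).toNat
decreasing_by all_goals omega

-- nothing strictly between b's unique parent b/10 and b reaches b (odd b ending in 1)
theorem solveGo_noPath_odd (b w : Int) (hb2 : b % 2 = 1) (hb10 : b % 10 = 1)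
    (hlo : b / 10 < w) (hhi : w < b) : solveGo b w = none := by
  rw [solveGo_unfold, if_neg (by omega : ¬ w = b)]
  by_cases h1 : w < w * 2 ∧ w * 2 ≤ b
  · have e1 : solveGo b (w * 2) = none :=
      solveGo_noPath_odd b (w * 2) hb2 hb10 (by omega) (by omega)
    by_cases h2 : w < w * 10 + 1 ∧ w * 10 + 1 ≤ b
    · have e2 : solveGo b (w * 10 + 1) = none :=
        solveGo_noPath_odd b (w * 10 + 1) hb2 hb10 (by omega) (by omega)
      rw [if_pos h2, if_pos h1, e1, e2]; rfl
    · rw [if_neg h2, if_pos h1, e1]; rfl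
  · by_cases h2 : w < w * 10 + 1 ∧ w * 10 + 1 ≤ b
    · have e2 : solveGo b (w * 10 + 1) = none :=
        solveGo_noPath_odd b (w * 10 + 1) hb2 hb10 (by omega) (by omega)
      rw [if_pos h2, if_neg h1, e2]; rfl
    · rw [if_neg h2, if_neg h1]
termination_by (b - w).toNat
decreasing_by all_goals omega

-- one backward step, even case: reaching b means reaching b/2 and doubling
theorem solveGo_even (b v : Int) (hv : 0 ≤ v) (hvb : v < b) (hb : b % 2 = 0) :
    solveGo b v = (solveGo (b / 2) v).map (· + 1) := by
  by_cases hmid : b / 2 < v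
  · rw [solveGo_none_big b v (by omega) (by omega),
        solveGo_none_big (b / 2) v (by omega) (by omega)]
    rfl
  · by_cases hhalf : v = b / 2
    · rw [solveGo_unfold, if_neg (by omega : ¬ v = b),
          if_neg (by omega : ¬ (v < v * 10 + 1 ∧ v * 10 + 1 ≤ b)),
          if_pos (by omega : v < v * 2 ∧ v * 2 ≤ b),
          (by omega : v * 2 = b), solveGo_self, ← hhalf, solveGo_self]
      rfl
    · have hvh : v < b / 2 := by omega
      rw [solveGo_unfold b v, solveGo_unfold (b / 2) v, if_neg (by omega : ¬ v = b),
          if_neg (by omega : ¬ v = b / 2)]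
      have e1 : (if v < v * 2 ∧ v * 2 ≤ b then solveUpd none (solveGo b (v * 2)) else none)
          = (if v < v * 2 ∧ v * 2 ≤ b / 2 then
              solveUpd none (solveGo (b / 2) (v * 2)) else none).map (· + 1) := by
        by_cases hA : v < v * 2 ∧ v * 2 ≤ b / 2
        · rw [if_pos hA, if_pos (by omega : v < v * 2 ∧ v * 2 ≤ b),
              solveGo_even b (v * 2) (by omega) (by omega) hb]
          simpa using solveUpd_map none (solveGo (b / 2) (v * 2))
        · by_cases hB : v < v * 2 ∧ v * 2 ≤ b
          · rw [if_pos hB, if_neg hA, solveGo_none_big b (v * 2) (by omega) (by omega)]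
            rfl
          · rw [if_neg hB, if_neg hA]
            rfl
      by_cases hA2 : v < v * 10 + 1 ∧ v * 10 + 1 ≤ b / 2
      · rw [if_pos hA2, if_pos (by omega : v < v * 10 + 1 ∧ v * 10 + 1 ≤ b), e1,
            solveGo_even b (v * 10 + 1) (by omega) (by omega) hb, solveUpd_map]
      · by_cases hB2 : v < v * 10 + 1 ∧ v * 10 + 1 ≤ b
        · rw [if_pos hB2, if_neg hA2,
              solveGo_none_big b (v * 10 + 1) (by omega) (by omega), solveUpd_none, e1]
        · rw [if_neg hB2, if_neg hA2, e1]
termination_by (b - v).toNat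
decreasing_by all_goals omega

-- one backward step, odd case (b ends in digit 1): reaching b means reaching b/10
theorem solveGo_odd (b v : Int) (hv : 0 ≤ v) (hvb : v < b) (hb2 : b % 2 = 1)
    (hb10 : b % 10 = 1) : solveGo b v = (solveGo (b / 10) v).map (· + 1) := by
  by_cases hmid : b / 10 < v
  · rw [solveGo_noPath_odd b v hb2 hb10 (by omega) hvb,
        solveGo_none_big (b / 10) v (by omega) (by omega)]
    rfl
  · by_cases hhalf : v = b / 10
    · rw [solveGo_unfold, if_neg (by omega : ¬ v = b),
          if_pos (by omega : v < v * 10 + 1 ∧ v * 10 + 1 ≤ b),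
          (by omega : v * 10 + 1 = b), solveGo_self]
      by_cases h1 : v < v * 2 ∧ v * 2 ≤ b
      · rw [if_pos h1, solveGo_noPath_odd b (v * 2) hb2 hb10 (by omega) (by omega),
            ← hhalf, solveGo_self]
        rfl
      · rw [if_neg h1, ← hhalf, solveGo_self]
        rfl
    · have hvh : v < b / 10 := by omega
      rw [solveGo_unfold b v, solveGo_unfold (b / 10) v, if_neg (by omega : ¬ v = b),
          if_neg (by omega : ¬ v = b / 10)]
      have e1 : (if v < v * 2 ∧ v * 2 ≤ b then solveUpd none (solveGo b (v * 2)) else none)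
          = (if v < v * 2 ∧ v * 2 ≤ b / 10 then
              solveUpd none (solveGo (b / 10) (v * 2)) else none).map (· + 1) := by
        by_cases hA : v < v * 2 ∧ v * 2 ≤ b / 10
        · rw [if_pos hA, if_pos (by omega : v < v * 2 ∧ v * 2 ≤ b),
              solveGo_odd b (v * 2) (by omega) (by omega) hb2 hb10]
          simpa using solveUpd_map none (solveGo (b / 10) (v * 2))
        · by_cases hB : v < v * 2 ∧ v * 2 ≤ b
          · rw [if_pos hB, if_neg hA,
                solveGo_noPath_odd b (v * 2) hb2 hb10 (by omega) (by omega)]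
            rfl
          · rw [if_neg hB, if_neg hA]
            rfl
      by_cases hA2 : v < v * 10 + 1 ∧ v * 10 + 1 ≤ b / 10
      · rw [if_pos hA2, if_pos (by omega : v < v * 10 + 1 ∧ v * 10 + 1 ≤ b), e1,
            solveGo_odd b (v * 10 + 1) (by omega) (by omega) hb2 hb10, solveUpd_map]
      · by_cases hB2 : v < v * 10 + 1 ∧ v * 10 + 1 ≤ b
        · rw [if_pos hB2, if_neg hA2,
              solveGo_noPath_odd b (v * 10 + 1) hb2 hb10 (by omega) (by omega),
              solveUpd_none, e1]
        · rw [if_neg hB2, if_neg hA2, e1]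
termination_by (b - v).toNat
decreasing_by all_goals omega

-- A's loop (with enough fuel) computes exactly what B's forward search computes
theorem loopA_spec (f : Nat) : ∀ (a b ret : Int), b.natAbs < f → (0 ≤ a ∨ b < 0) →
    (if a = (solveLoopA f a b ret).1 then (solveLoopA f a b ret).2 + 1 else -1)
      = (match solveGo b a with | some r => ret + r + 1 | none => -1) := by
  induction f with
  | zero => intro a b ret hf _; omega
  | succ f ih =>
    intro a b ret hf hpre
    by_cases hab : a < b
    · have hmod2 : PySem.Int.mod b 2 = b % 2 := PySem.Int.mod_eq_emod_of_pos (by omega)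
      have hmod10 : PySem.Int.mod b 10 = b % 10 := PySem.Int.mod_eq_emod_of_pos (by omega)
      have hdiv2 : PySem.Int.floordiv b 2 = b / 2 := PySem.Int.floordiv_eq_ediv_of_pos (by omega)
      have hdiv10 : PySem.Int.floordiv b 10 = b / 10 := PySem.Int.floordiv_eq_ediv_of_pos (by omega)
      simp only [solveLoopA, if_pos hab, hmod2, hmod10, hdiv2, hdiv10]
      by_cases h2 : b % 2 = 0
      · rw [if_pos h2]
        rcases hpre with ha | hbneg
        · rw [ih a (b / 2) (ret + 1) (by omega) (Or.inl ha), solveGo_even b a ha hab h2]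
          cases solveGo (b / 2) a <;> simp <;> try omega
        · rw [ih a (b / 2) (ret + 1) (by omega) (Or.inr (by omega)),
              solveGo_none_big (b / 2) a (by omega) (by omega),
              solveGo_none_big b a (by omega) (by omega)]
      · rw [if_neg h2]
        have h2' : b % 2 = 1 := by omega
        by_cases h10 : b % 10 = 1
        · rw [if_pos h10]
          rcases hpre with ha | hbneg
          · rw [ih a (b / 10) (ret + 1) (by omega) (Or.inl ha), solveGo_odd b a ha hab h2' h10]
            cases solveGo (b / 10) a <;> simp <;> try omega
          · rw [ih a (b / 10) (ret + 1) (by omega) (Or.inr (by omega)),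
                solveGo_none_big (b / 10) a (by omega) (by omega),
                solveGo_none_big b a (by omega) (by omega)]
        · rw [if_neg h10, solveGo_no_parent b a h2' h10 (by omega)]
          simp [if_neg (by omega : ¬ a = b)]
    · simp only [solveLoopA, if_neg hab]
      by_cases heq : a = b
      · rw [if_pos heq, heq, solveGo_self b]
        show ret + 1 = ret + 0 + 1
        omega
      · rw [if_neg heq, solveGo_none_big b a heq (by omega)]

-- ===== VERDICT (by name: the statement is the Claim_ definition above) =====
theorem solve_spec : Claim_equal_solve := by
  intro a b _ hpre
  unfold Spec_solve solve solve_alt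
  have h := loopA_spec (b.natAbs + 1) a b 0 (by omega) hpre.2
  simp only at h
  rw [h]
  cases solveGo b a with
  | none => rfl
  | some r => simp
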